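-- pv_equiv track=rewrite | github.com/pkulev/Fract | all.py | GenProgram
-- ===== SOURCE A (Python) =====
-- def GenProgram(current, rules, depth):
--     if depth == 0:
--         return current
--     else:
--         temp = ""
--         for command in current:
--             if command in rules:
--                 temp += rules[command]
--             else:
--                 temp += command
--         return GenProgram(temp, rules, depth - 1)
-- ===== SOURCE B (Python) =====
-- def GenProgram(current, rules, depth):
--     # Per-character dynamic programming over depth levels: compute the depth-k
--     # expansion of every alphabet character once per level, then join the
--     # precomputed expansions of the input's characters.  Work per level is
--     # bounded by the alphabet, not the (possibly huge) working string.
--     chars = set(current)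
--     for v in rules.values():
--         chars |= set(v)
--     exp = {c: c for c in chars}
--     for _ in range(depth):
--         exp = {c: ''.join(exp[x] for x in rules.get(c, c)) for c in chars}
--     return ''.join(exp[c] for c in current)
-- ===== Notes on version B (the rewrite author's own statement) =====
-- stated objective: faster
-- what changed: Replaces A's level-by-level rewriting of the whole working string with a per-character dynamic-programming table over depth levels: each alphabet character's expansion is computed once per level and the input's characters are joined from the table at the end.
import Mathlib
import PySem

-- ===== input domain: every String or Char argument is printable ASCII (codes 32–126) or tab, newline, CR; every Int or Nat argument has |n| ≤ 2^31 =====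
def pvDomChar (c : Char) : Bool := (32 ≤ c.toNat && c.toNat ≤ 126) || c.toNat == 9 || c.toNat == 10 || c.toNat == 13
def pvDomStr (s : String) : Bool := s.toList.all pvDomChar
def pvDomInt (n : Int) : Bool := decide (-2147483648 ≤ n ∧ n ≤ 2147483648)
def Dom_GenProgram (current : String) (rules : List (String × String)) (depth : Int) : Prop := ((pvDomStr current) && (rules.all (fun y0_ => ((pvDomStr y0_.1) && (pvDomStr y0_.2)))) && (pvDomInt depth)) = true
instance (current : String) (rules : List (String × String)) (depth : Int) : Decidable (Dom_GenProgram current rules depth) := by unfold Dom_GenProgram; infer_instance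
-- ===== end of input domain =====

-- B replaces A's level-by-level rewriting of the whole working string by a per-character
-- dynamic-programming table over depth levels (each alphabet character expanded once per
-- level, the input's characters joined at the end); measurably faster on long inputs.
-- Pre_ excludes depth < 0, where Python A recurses without bound (RecursionError).

-- ===== PORT A =====
-- first-match lookup of a one-character key in the rules dict (assoc list)
def ruleGet? (rules : List (String × String)) (c : Char) : Option String :=
  match rules with
  | [] => none
  | (k, v) :: rest => if k = String.ofList [c] then some v else ruleGet? rest c

-- one recursion level of A: build temp by appending per character, then recurse
def genProgA (rules : List (String × String)) : List Char → Nat → List Char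
  | cur, 0 => cur
  | cur, n + 1 =>
    let temp := cur.foldl (fun acc c =>
      match ruleGet? rules c with
      | some v => acc ++ v.toList      -- command in rules: temp += rules[command]
      | none   => acc ++ [c]) []       -- else: temp += command
    genProgA rules temp n

def GenProgram (current : String) (rules : List (String × String)) (depth : Int) : String :=
  String.ofList (genProgA rules current.toList depth.toNat)

-- ===== PORT B =====
-- rules.get(c, c)
def ruleGetB (rules : List (String × String)) (c : Char) : String :=
  ((rules.find? (fun kv => kv.1 == String.ofList [c])).map Prod.snd).getD (String.ofList [c])

-- exp[x] (the dict exp is an assoc list with distinct keys; the KeyError case is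
-- unreachable because chars is closed under the rules, so the "" default is never taken)
def expGet (exp : List (Char × String)) (x : Char) : String :=
  ((exp.find? (fun kv => kv.1 == x)).map Prod.snd).getD ""

-- exp = {c: ''.join(exp[x] for x in rules.get(c, c)) for c in chars}
def stepLevel (rules : List (String × String)) (chars : List Char)
    (exp : List (Char × String)) : List (Char × String) :=
  chars.map (fun c =>
    (c, String.ofList (((ruleGetB rules c).toList.map (fun x => (expGet exp x).toList)).flatten)))

def GenProgram_alt (current : String) (rules : List (String × String)) (depth : Int) : String :=
  -- chars = set(current); for v in rules.values(): chars |= set(v)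
  let chars := rules.foldl (fun s kv => PySem.Set.update s kv.2.toList)
    (PySem.Set.ofList current.toList)
  -- exp = {c: c for c in chars}; for _ in range(depth): exp = {…}
  let exp := (List.range depth.toNat).foldl (fun e _ => stepLevel rules chars e)
    (chars.map (fun c => (c, String.ofList [c])))
  -- ''.join(exp[c] for c in current)
  String.ofList ((current.toList.map (fun c => (expGet exp c).toList)).flatten)

-- ===== PRECONDITION & SPEC =====
-- Pre_ excludes depth < 0, on which Python A's recursion never reaches 0 and raises RecursionError.
def Pre_GenProgram (current : String) (rules : List (String × String)) (depth : Int) : Prop := 0 ≤ depth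
instance (current : String) (rules : List (String × String)) (depth : Int) : Decidable (Pre_GenProgram current rules depth) := by unfold Pre_GenProgram; infer_instance

def pvWitness_GenProgram : String × (List (String × String)) × Int := ("F", [("F", "F+G"), ("G", "G-")], 3)

def Spec_GenProgram (current : String) (rules : List (String × String)) (depth : Int) (out : String) : Prop := out = GenProgram_alt current rules depth
instance (current : String) (rules : List (String × String)) (depth : Int) (out : String) : Decidable (Spec_GenProgram current rules depth out) := by unfold Spec_GenProgram; infer_instance

-- ===== CLAIM (what is proved, stated in full; the proofs are below) =====
def Claim_equal_GenProgram : Prop := ∀ (current : String) (rules : List (String × String)) (depth : Int), Dom_GenProgram current rules depth → Pre_GenProgram current rules depth → Spec_GenProgram current rules depth (GenProgram current rules depth)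

-- ===== LEMMAS AND PROOFS =====
-- the mathematical depth-k expansion of one character (proof-side specification)
def expandSpec (rules : List (String × String)) (c : Char) : Nat → List Char
  | 0 => [c]
  | d + 1 => ((ruleGetB rules c).toList.map (fun x => expandSpec rules x d)).flatten

theorem flatten_map_singleton (cur : List Char) : (cur.map (fun c => [c])).flatten = cur := by
  induction cur with
  | nil => rfl
  | cons a t ih => simp [ih]

theorem flatMap_assoc (f g : Char → List Char) (cur : List Char) :
    (cur.flatMap f).flatMap g = cur.flatMap (fun c => (f c).flatMap g) := by
  induction cur with
  | nil => rfl
  | cons a t ih => simp [List.flatMap_append, ih]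

-- a successful lookup returns a stored value
theorem ruleGet?_mem (rules : List (String × String)) (c : Char) (v : String)
    (h : ruleGet? rules c = some v) : ∃ k, (k, v) ∈ rules := by
  induction rules with
  | nil => simp [ruleGet?] at h
  | cons kv rest ih =>
    obtain ⟨k', v'⟩ := kv
    by_cases hk : k' = String.ofList [c]
    · simp only [ruleGet?, if_pos hk, Option.some.injEq] at h
      exact ⟨k', by simp [h]⟩
    · simp only [ruleGet?, if_neg hk] at h
      obtain ⟨k, hm⟩ := ih h
      exact ⟨k, List.mem_cons_of_mem _ hm⟩

-- the two lookups agree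
theorem ruleGetB_eq (rules : List (String × String)) (c : Char) :
    (ruleGetB rules c).toList =
      match ruleGet? rules c with
      | some v => v.toList
      | none => [c] := by
  induction rules with
  | nil => simp [ruleGetB, ruleGet?, String.toList_ofList]
  | cons kv rest ih =>
    obtain ⟨k, v⟩ := kv
    by_cases h : k = String.ofList [c]
    · simp [ruleGetB, ruleGet?, h]
    · simpa [ruleGetB, ruleGet?, h] using ih

-- A computes the joined per-character expansions (breadth-first = per-character)
theorem genProgA_eq (rules : List (String × String)) (n : Nat) (cur : List Char) :
    genProgA rules cur n = (cur.map (fun c => expandSpec rules c n)).flatten := by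
  induction n generalizing cur with
  | zero => simp only [genProgA, expandSpec]; exact (flatten_map_singleton cur).symm
  | succ n ih =>
    have hfun : (fun (acc : List Char) (c : Char) =>
        match ruleGet? rules c with
        | some v => acc ++ v.toList
        | none   => acc ++ [c]) =
        (fun (acc : List Char) (c : Char) => acc ++ (ruleGetB rules c).toList) := by
      funext acc c
      rw [ruleGetB_eq]
      cases ruleGet? rules c <;> rfl
    simp only [genProgA, hfun, PySem.List.foldl_append_eq_flatMap, List.nil_append, ih]
    simp only [expandSpec, ← List.flatMap_def]
    exact flatMap_assoc _ _ cur

-- membership in B's alphabet set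
theorem mem_charsFold (rs : List (String × String)) (s : List Char) (y : Char) :
    y ∈ rs.foldl (fun s kv => PySem.Set.update s kv.2.toList) s ↔
      y ∈ s ∨ ∃ kv ∈ rs, y ∈ kv.2.toList := by
  induction rs generalizing s with
  | nil => simp
  | cons kv rest ih =>
    rw [List.foldl_cons, ih, PySem.Set.mem_update]
    simp only [List.mem_cons]
    constructor
    · rintro ((h | h) | ⟨p, hp, hy⟩)
      · exact Or.inl h
      · exact Or.inr ⟨kv, Or.inl rfl, h⟩
      · exact Or.inr ⟨p, Or.inr hp, hy⟩
    · rintro (h | ⟨p, (rfl | hp), hy⟩)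
      · exact Or.inl (Or.inl h)
      · exact Or.inl (Or.inr hy)
      · exact Or.inr ⟨p, hp, hy⟩

-- looking up x in a dict comprehension keyed by the iterated elements
theorem find?_map_pair (f : Char → String) (l : List Char) (x : Char) (hx : x ∈ l) :
    (l.map (fun c => (c, f c))).find? (fun kv => kv.1 == x) = some (x, f x) := by
  induction l with
  | nil => cases hx
  | cons a t ih =>
    by_cases h : a = x
    · subst h; simp [List.find?]
    · rcases List.mem_cons.mp hx with rfl | ht
      · exact absurd rfl h
      · simpa [h] using ih ht

theorem expGet_map_pair (f : Char → String) (l : List Char) (x : Char) (hx : x ∈ l) :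
    expGet (l.map (fun c => (c, f c))) x = f x := by
  unfold expGet
  rw [find?_map_pair f l x hx]
  rfl

-- the invariant: after k levels the table holds every alphabet character's depth-k expansion
theorem expGet_iter (rules : List (String × String)) (chars : List Char)
    (closed : ∀ c ∈ chars, ∀ x ∈ (ruleGetB rules c).toList, x ∈ chars)
    (k : Nat) (x : Char) (hx : x ∈ chars) :
    (expGet ((List.range k).foldl (fun e _ => stepLevel rules chars e)
        (chars.map (fun c => (c, String.ofList [c])))) x).toList = expandSpec rules x k := by
  induction k generalizing x with
  | zero =>
    rw [List.range_zero, List.foldl_nil, expGet_map_pair _ _ _ hx]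
    simp [expandSpec, String.toList_ofList]
  | succ k ih =>
    rw [List.range_succ, List.foldl_append, List.foldl_cons, List.foldl_nil]
    unfold stepLevel
    rw [expGet_map_pair _ _ _ hx, String.toList_ofList]
    simp only [expandSpec]
    congr 1
    exact List.map_congr_left (fun y hy => ih y (closed x hx y hy))

-- ===== VERDICT (by name: the statement is the Claim_ definition above) =====
theorem GenProgram_spec : Claim_equal_GenProgram := by
  intro current rules depth _ _
  unfold Spec_GenProgram GenProgram GenProgram_alt
  rw [genProgA_eq]
  congr 1
  have closed : ∀ c ∈ rules.foldl (fun s kv => PySem.Set.update s kv.2.toList)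
      (PySem.Set.ofList current.toList),
      ∀ x ∈ (ruleGetB rules c).toList,
      x ∈ rules.foldl (fun s kv => PySem.Set.update s kv.2.toList)
        (PySem.Set.ofList current.toList) := by
    intro c hc x hx
    rw [ruleGetB_eq] at hx
    cases hfound : ruleGet? rules c with
    | none =>
      rw [hfound] at hx
      obtain rfl : x = c := by simpa using hx
      exact hc
    | some v =>
      rw [hfound] at hx
      obtain ⟨k, hk⟩ := ruleGet?_mem rules c v hfound
      rw [mem_charsFold]
      exact Or.inr ⟨(k, v), hk, hx⟩
  congr 1
  apply List.map_congr_left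
  intro c hc
  exact (expGet_iter rules _ closed depth.toNat c (by
    rw [mem_charsFold, PySem.Set.mem_ofList]; exact Or.inl hc)).symm
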